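-- pv_equiv track=rewrite | github.com/JyLIU-emma/MWE_coref | seen2seen/seen2seen.py | choix_filtres
-- ===== SOURCE A (Python) =====
-- import itertools
--
-- def choix_filtres(nb_filtres):
--     liste_filtres = []
--     for n in range(0, nb_filtres):
--         liste_filtres.append([True, False])
--     all_configs = []
--     for element in itertools.product(*liste_filtres):
--         all_configs.append(element)
--     dico_config = {}
--     for n in range(0, len(all_configs)):
--         config = "config_" + str(n)
--         dico_config[config] = all_configs[n]
--     return dico_config
-- ===== SOURCE B (Python) =====
-- def choix_filtres(nb_filtres):
--     # Decode each config index directly into its booleans (MSB first, 0 -> True),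
--     # instead of materialising itertools.product over n copies of [True, False].
--     m = max(nb_filtres, 0)
--     dico_config = {}
--     for i in range(2 ** m):
--         bits = []
--         q = i
--         for _ in range(m):
--             bits.append(q % 2 == 0)
--             q //= 2
--         dico_config["config_" + str(i)] = tuple(reversed(bits))
--     return dico_config
-- ===== Notes on version B (the rewrite author's own statement) =====
-- stated objective: alternative
-- what changed: B decodes each config index i directly into its boolean tuple by repeated divmod (MSB first, even bit = True), instead of building the cartesian product of n copies of [True, False] via itertools.product and then enumerating it.
import Mathlib
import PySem

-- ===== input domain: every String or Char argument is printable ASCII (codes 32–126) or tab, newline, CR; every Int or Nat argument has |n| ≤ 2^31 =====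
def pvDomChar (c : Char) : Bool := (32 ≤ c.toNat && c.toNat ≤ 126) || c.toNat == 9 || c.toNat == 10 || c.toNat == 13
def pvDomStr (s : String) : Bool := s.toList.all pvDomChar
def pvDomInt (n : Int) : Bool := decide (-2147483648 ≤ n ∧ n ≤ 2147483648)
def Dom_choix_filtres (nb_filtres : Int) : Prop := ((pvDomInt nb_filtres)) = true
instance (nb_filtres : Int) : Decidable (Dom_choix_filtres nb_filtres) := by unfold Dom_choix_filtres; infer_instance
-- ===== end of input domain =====

-- B decodes each config index straight into its booleans instead of materialising
-- itertools.product over n copies of [True, False]; alternative algorithm, same cost.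

-- ===== PORT A =====
def choix_filtres (nb_filtres : Int) : List (String × List Bool) :=
  let liste_filtres := (PySem.List.pyRange 0 nb_filtres 1).foldl
    (fun acc _ => acc ++ [[true, false]]) ([] : List (List Bool))
  let all_configs := liste_filtres.foldl
    (fun acc l => acc.flatMap (fun t => l.map (fun x => t ++ [x]))) [[]]
  ((PySem.List.pyRange 0 (PySem.List.len all_configs) 1).foldl
    (fun d n => d.insert ("config_" ++ PySem.Int.toStr n) (PySem.List.pyGetD all_configs n []))
    PySem.Dict.empty).items

-- ===== PORT B =====
def choix_filtres_alt (nb_filtres : Int) : List (String × List Bool) :=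
  let m := max nb_filtres 0
  ((PySem.List.pyRange 0 ((2 : Int) ^ m.toNat) 1).foldl
    (fun d i =>
      let p := (PySem.List.pyRange 0 m 1).foldl
        (fun (s : List Bool × Int) _ =>
          (s.1 ++ [PySem.Int.mod s.2 2 == 0], PySem.Int.floordiv s.2 2))
        (([] : List Bool), i)
      d.insert ("config_" ++ PySem.Int.toStr i) p.1.reverse)
    PySem.Dict.empty).items

-- ===== PRECONDITION & SPEC =====
def Spec_choix_filtres (nb_filtres : Int) (out : List (String × List Bool)) : Prop := out = choix_filtres_alt nb_filtres
instance (nb_filtres : Int) (out : List (String × List Bool)) : Decidable (Spec_choix_filtres nb_filtres out) := by unfold Spec_choix_filtres; infer_instance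

-- ===== CLAIM (what is proved, stated in full; the proofs are below) =====
def Claim_equal_choix_filtres : Prop := ∀ (nb_filtres : Int), Dom_choix_filtres nb_filtres → Spec_choix_filtres nb_filtres (choix_filtres nb_filtres)

-- ===== LEMMAS AND PROOFS =====

-- MSB-first decode of index i into k booleans (true for bit 0), the common value of both sides
def pvDec : Nat → Nat → List Bool
  | 0, _ => []
  | k + 1, i => pvDec k (i / 2) ++ [decide (i % 2 = 0)]

-- LSB-first decode as B's inner loop produces it
def pvLsb : Nat → Int → List Bool
  | 0, _ => []
  | k + 1, q => (PySem.Int.mod q 2 == 0) :: pvLsb k (PySem.Int.floordiv q 2)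

theorem pv_foldl_const_append {α β : Type} (c : β) :
    ∀ (l : List α) (acc : List β),
      l.foldl (fun acc _ => acc ++ [c]) acc = acc ++ List.replicate l.length c := by
  intro l
  induction l with
  | nil => simp
  | cons x xs ih =>
      intro acc
      simp [List.foldl_cons, ih, List.replicate_succ]

theorem pv_range_two_mul {α : Type} (f : Nat → α) :
    ∀ n : Nat, (List.range (2 * n)).map f
      = (List.range n).flatMap (fun q => [f (2 * q), f (2 * q + 1)]) := by
  intro n
  induction n with
  | zero => simp
  | succ n ih =>
      have h2 : 2 * (n + 1) = (2 * n + 1) + 1 := by omega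
      rw [h2, List.range_succ, List.range_succ, List.range_succ]
      simp [ih]

theorem pv_prod_rows : ∀ k : Nat,
    (List.replicate k [true, false]).foldl
        (fun acc l => acc.flatMap (fun t => l.map (fun x => t ++ [x]))) [[]]
      = (List.range (2 ^ k)).map (pvDec k) := by
  intro k
  induction k with
  | zero => simp [pvDec]
  | succ k ih =>
      rw [List.replicate_succ', List.foldl_append, ih]
      have hpow : 2 ^ (k + 1) = 2 * 2 ^ k := by ring
      rw [hpow, pv_range_two_mul]
      simp only [List.foldl_cons, List.foldl_nil]
      rw [List.flatMap_def, List.flatMap_def, List.map_map]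
      congr 1
      apply List.map_congr_left
      intro q _
      have h1 : pvDec (k + 1) (2 * q) = pvDec k q ++ [true] := by
        simp [pvDec, Nat.mul_mod_right]
      have h2 : pvDec (k + 1) (2 * q + 1) = pvDec k q ++ [false] := by
        have : (2 * q + 1) / 2 = q := by omega
        simp [pvDec, this]
      simp [h1, h2]

theorem pv_inner_fold : ∀ (l : List Int) (acc : List Bool) (q : Int),
    (l.foldl (fun (s : List Bool × Int) _ =>
        (s.1 ++ [PySem.Int.mod s.2 2 == 0], PySem.Int.floordiv s.2 2)) (acc, q)).1
      = acc ++ pvLsb l.length q := by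
  intro l
  induction l with
  | nil => simp [pvLsb]
  | cons x xs ih =>
      intro acc q
      simp only [List.foldl_cons, List.length_cons, pvLsb]
      rw [ih]
      simp

theorem pv_lsb_reverse : ∀ (k : Nat) (n : Nat),
    (pvLsb k (n : Int)).reverse = pvDec k n := by
  intro k
  induction k with
  | zero => intro n; simp [pvLsb, pvDec]
  | succ k ih =>
      intro n
      have hfd : PySem.Int.floordiv (n : Int) 2 = ((n / 2 : Nat) : Int) :=
        PySem.Int.floordiv_natCast n 2
      have hmd : PySem.Int.mod (n : Int) 2 = ((n % 2 : Nat) : Int) :=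
        PySem.Int.mod_natCast n 2
      have hbe : (PySem.Int.mod (n : Int) 2 == 0) = decide (n % 2 = 0) := by
        rw [hmd]
        rcases Nat.mod_two_eq_zero_or_one n with h | h <;> simp [h]
      simp only [pvLsb, List.reverse_cons, hfd, hbe, ih, pvDec]

-- ===== VERDICT (by name: the statement is the Claim_ definition above) =====
theorem choix_filtres_spec : Claim_equal_choix_filtres := by
  intro nb _
  unfold Spec_choix_filtres choix_filtres choix_filtres_alt
  dsimp only
  set k := nb.toNat with hk
  have hmax : (max nb 0).toNat = k := by omega
  have hrangeA : (PySem.List.pyRange 0 nb 1).length = k := by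
    rw [PySem.List.length_pyRange_one]; omega
  have hconf :
      ((PySem.List.pyRange 0 nb 1).foldl (fun acc _ => acc ++ [[true, false]])
          ([] : List (List Bool))).foldl
          (fun acc l => acc.flatMap (fun t => l.map (fun x => t ++ [x]))) [[]]
        = (List.range (2 ^ k)).map (pvDec k) := by
    rw [pv_foldl_const_append, hrangeA]
    simpa using pv_prod_rows k
  rw [hconf]
  have hlen : PySem.List.len ((List.range (2 ^ k)).map (pvDec k)) = ((2 ^ k : Nat) : Int) := by
    simp [PySem.List.len_eq]
  have hpow : ((2 : Int) ^ (max nb 0).toNat) = ((2 ^ k : Nat) : Int) := by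
    rw [hmax]; push_cast; ring
  rw [hlen, hpow]
  congr 1
  apply PySem.List.foldl_congr_mem
  intro d i hi
  have hi' := (PySem.List.mem_pyRange_one).1 hi
  obtain ⟨n, rfl⟩ : ∃ n : Nat, i = (n : Int) := ⟨i.toNat, by omega⟩
  have hn : n < 2 ^ k := by exact_mod_cast hi'.2
  have hlenInner : (PySem.List.pyRange 0 (max nb 0) 1).length = k := by
    rw [PySem.List.length_pyRange_one]; omega
  have hval : PySem.List.pyGetD ((List.range (2 ^ k)).map (pvDec k)) (n : Int) [] = pvDec k n := by
    rw [PySem.List.pyGetD_natCast]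
    simp [List.getD, hn]
  have hinner :
      ((PySem.List.pyRange 0 (max nb 0) 1).foldl
          (fun (s : List Bool × Int) _ =>
            (s.1 ++ [PySem.Int.mod s.2 2 == 0], PySem.Int.floordiv s.2 2))
          (([] : List Bool), (n : Int))).1.reverse = pvDec k n := by
    rw [pv_inner_fold, hlenInner]
    simpa using pv_lsb_reverse k n
  rw [hval, hinner]
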